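-- pv_equiv track=rewrite | github.com/Josue23/lista-de-exercicios-python-brasil | secao_02_estrutura_de_decisao/ex_19_decomposicao_de_numero.py | decompor_numero
-- ===== SOURCE A (Python) =====
-- def rreplace(s, old, new, occurrence):
--     li = s.rsplit(old, occurrence)
--     return new.join(li)
--
-- def decompor_numero(entrada: int):
--     """Escreva aqui em baixo a sua solução"""
--     if entrada > 999:
--         return 'O número precisa ser menor que 1000'
--     elif entrada < 1:
--         return 'O número precisa ser positivo'
--     centena = 100
--     dezena = 10
--
--     centenas = entrada // centena
--     restante = entrada % centena
--
--     dezenas = restante // dezena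
--     restante = restante % dezena
--
--     unidades = restante
--
--     '''Python Ternary operator'''
--     centenas_str = 'centenas' if centenas > 1 else 'centena'
--     dezenas_str = 'dezenas' if dezenas > 1 else 'dezena'
--     unidades_str = 'unidades' if unidades > 1 else 'unidade'
--
--     lista = [centenas, dezenas, unidades]
--     lista_str = [centenas_str, dezenas_str, unidades_str]
--
--     mensagem = ''
--     for count, value in enumerate(lista):
--         if value > 0:
--             mensagem += f'{lista[count]} {lista_str[count]}, '
--     # mensagem = mensagem[:-2]
--     '''altera a última ocorrência de ", " por string vazia'''
--     mensagem = rreplace(mensagem, ', ', '', 1)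
--
--     return f"{entrada} = {rreplace(mensagem, ', ', ' e ', 1)}"
-- ===== SOURCE B (Python) =====
-- def decompor_numero(entrada: int):
--     if entrada > 999:
--         return 'O número precisa ser menor que 1000'
--     if entrada < 1:
--         return 'O número precisa ser positivo'
--     centenas, restante = divmod(entrada, 100)
--     dezenas, unidades = divmod(restante, 10)
--     parts = [f"{v} {w}{'s' if v > 1 else ''}"
--              for v, w in ((centenas, 'centena'), (dezenas, 'dezena'), (unidades, 'unidade'))
--              if v > 0]
--     msg = parts[0] if len(parts) == 1 else ' e '.join([', '.join(parts[:-1]), parts[-1]])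
--     return f'{entrada} = {msg}'
-- ===== Notes on version B (the rewrite author's own statement) =====
-- stated objective: simpler
-- what changed: B builds the list of formatted digit parts with a comprehension and assembles the message by joining them (', ' between, ' e ' before the last), instead of A's append-with-trailing-separator loop followed by two rsplit-based rreplace fix-ups.
import Mathlib
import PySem

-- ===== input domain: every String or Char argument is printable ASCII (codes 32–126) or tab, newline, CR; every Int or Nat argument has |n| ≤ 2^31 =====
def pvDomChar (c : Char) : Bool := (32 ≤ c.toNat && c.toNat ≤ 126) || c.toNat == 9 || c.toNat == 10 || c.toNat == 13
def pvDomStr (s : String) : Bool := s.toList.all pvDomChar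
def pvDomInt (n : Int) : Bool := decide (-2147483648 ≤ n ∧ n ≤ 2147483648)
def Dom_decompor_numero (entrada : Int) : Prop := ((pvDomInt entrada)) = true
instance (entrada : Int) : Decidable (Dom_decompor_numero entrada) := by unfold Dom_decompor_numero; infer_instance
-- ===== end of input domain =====

-- B builds the formatted parts with a comprehension and joins them (', ' between, ' e ' last),
-- eliminating A's trailing-separator construction and the rreplace helper (objective: simpler).

-- ===== PORT A =====
-- exact hand port of rreplace(s, old, new, 1) = new.join(s.rsplit(old, 1)) for nonempty old:
-- rsplit(old, 1) splits at the LAST occurrence of old (or not at all), so the result replaces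
-- the last occurrence of old by new.  A only calls rreplace with occurrence = 1 and old = ', '.
def pvRreplace1 (s old new : List Char) : List Char :=
  let i := PySem.Chars.rfind s old
  if i = -1 then s
  else s.take i.toNat ++ new ++ s.drop (i.toNat + old.length)

def decompor_numero (entrada : Int) : String :=
  if entrada > 999 then "O número precisa ser menor que 1000"
  else if entrada < 1 then "O número precisa ser positivo"
  else
    let centenas := PySem.Int.floordiv entrada 100
    let restante := PySem.Int.mod entrada 100
    let dezenas := PySem.Int.floordiv restante 10
    let restante2 := PySem.Int.mod restante 10
    let unidades := restante2
    let centenas_str := if centenas > 1 then ['c', 'e', 'n', 't', 'e', 'n', 'a', 's'] else ['c', 'e', 'n', 't', 'e', 'n', 'a']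
    let dezenas_str := if dezenas > 1 then ['d', 'e', 'z', 'e', 'n', 'a', 's'] else ['d', 'e', 'z', 'e', 'n', 'a']
    let unidades_str := if unidades > 1 then ['u', 'n', 'i', 'd', 'a', 'd', 'e', 's'] else ['u', 'n', 'i', 'd', 'a', 'd', 'e']
    let lista := [centenas, dezenas, unidades]
    let lista_str := [centenas_str, dezenas_str, unidades_str]
    let mensagem := (PySem.List.enumerate lista).foldl (fun m p =>
      if p.2 > 0 then
        m ++ PySem.Int.toChars (PySem.List.pyGetD lista p.1 0) ++ [' ']
          ++ PySem.List.pyGetD lista_str p.1 [] ++ [',', ' ']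
      else m) []
    let mensagem2 := pvRreplace1 mensagem [',', ' '] []
    String.mk (PySem.Int.toChars entrada ++ [' ', '=', ' ']
      ++ pvRreplace1 mensagem2 [',', ' '] [' ', 'e', ' '])

-- ===== PORT B =====
def decompor_numero_alt (entrada : Int) : String :=
  if entrada > 999 then "O número precisa ser menor que 1000"
  else if entrada < 1 then "O número precisa ser positivo"
  else
    let centenas := PySem.Int.floordiv entrada 100
    let restante := PySem.Int.mod entrada 100
    let dezenas := PySem.Int.floordiv restante 10
    let unidades := PySem.Int.mod restante 10
    let parts := [(centenas, ['c', 'e', 'n', 't', 'e', 'n', 'a']), (dezenas, ['d', 'e', 'z', 'e', 'n', 'a']),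
                  (unidades, ['u', 'n', 'i', 'd', 'a', 'd', 'e'])].filterMap (fun p =>
      if p.1 > 0 then
        some (PySem.Int.toChars p.1 ++ [' '] ++ p.2 ++ (if p.1 > 1 then ['s'] else []))
      else none)
    let msg := if parts.length == 1 then parts.headD []
      else PySem.Chars.join [' ', 'e', ' ']
             [PySem.Chars.join [',', ' '] parts.dropLast, parts.getLastD []]
    String.mk (PySem.Int.toChars entrada ++ [' ', '=', ' '] ++ msg)

-- ===== PRECONDITION & SPEC =====
def Spec_decompor_numero (entrada : Int) (out : String) : Prop := out = decompor_numero_alt entrada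
instance (entrada : Int) (out : String) : Decidable (Spec_decompor_numero entrada out) := by unfold Spec_decompor_numero; infer_instance

-- ===== CLAIM (what is proved, stated in full; the proofs are below) =====
def Claim_equal_decompor_numero : Prop := ∀ (entrada : Int), Dom_decompor_numero entrada → Spec_decompor_numero entrada (decompor_numero entrada)

-- ===== LEMMAS AND PROOFS =====
set_option maxHeartbeats 1000000 in
set_option maxRecDepth 100000 in
theorem pv_key_0 : (List.range' 0 100).all
    (fun n => decompor_numero ((n : Int) + 1) == decompor_numero_alt ((n : Int) + 1)) = true := by
  decide

set_option maxHeartbeats 1000000 in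
set_option maxRecDepth 100000 in
theorem pv_key_1 : (List.range' 100 100).all
    (fun n => decompor_numero ((n : Int) + 1) == decompor_numero_alt ((n : Int) + 1)) = true := by
  decide

set_option maxHeartbeats 1000000 in
set_option maxRecDepth 100000 in
theorem pv_key_2 : (List.range' 200 100).all
    (fun n => decompor_numero ((n : Int) + 1) == decompor_numero_alt ((n : Int) + 1)) = true := by
  decide

set_option maxHeartbeats 1000000 in
set_option maxRecDepth 100000 in
theorem pv_key_3 : (List.range' 300 100).all
    (fun n => decompor_numero ((n : Int) + 1) == decompor_numero_alt ((n : Int) + 1)) = true := by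
  decide

set_option maxHeartbeats 1000000 in
set_option maxRecDepth 100000 in
theorem pv_key_4 : (List.range' 400 100).all
    (fun n => decompor_numero ((n : Int) + 1) == decompor_numero_alt ((n : Int) + 1)) = true := by
  decide

set_option maxHeartbeats 1000000 in
set_option maxRecDepth 100000 in
theorem pv_key_5 : (List.range' 500 100).all
    (fun n => decompor_numero ((n : Int) + 1) == decompor_numero_alt ((n : Int) + 1)) = true := by
  decide

set_option maxHeartbeats 1000000 in
set_option maxRecDepth 100000 in
theorem pv_key_6 : (List.range' 600 100).all
    (fun n => decompor_numero ((n : Int) + 1) == decompor_numero_alt ((n : Int) + 1)) = true := by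
  decide

set_option maxHeartbeats 1000000 in
set_option maxRecDepth 100000 in
theorem pv_key_7 : (List.range' 700 100).all
    (fun n => decompor_numero ((n : Int) + 1) == decompor_numero_alt ((n : Int) + 1)) = true := by
  decide

set_option maxHeartbeats 1000000 in
set_option maxRecDepth 100000 in
theorem pv_key_8 : (List.range' 800 100).all
    (fun n => decompor_numero ((n : Int) + 1) == decompor_numero_alt ((n : Int) + 1)) = true := by
  decide

set_option maxHeartbeats 1000000 in
set_option maxRecDepth 100000 in
theorem pv_key_9 : (List.range' 900 99).all
    (fun n => decompor_numero ((n : Int) + 1) == decompor_numero_alt ((n : Int) + 1)) = true := by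
  decide

theorem pv_key (n : Nat) (h : n < 999) :
    decompor_numero ((n : Int) + 1) = decompor_numero_alt ((n : Int) + 1) := by
  have hm : ∀ (k a c : Nat), (List.range' a c).all
      (fun n => decompor_numero ((n : Int) + 1) == decompor_numero_alt ((n : Int) + 1)) = true →
      a ≤ k → k < a + c → decompor_numero ((k : Int) + 1) = decompor_numero_alt ((k : Int) + 1) := by
    intro k a c hall h1 h2
    exact eq_of_beq (List.all_eq_true.mp hall k (List.mem_range'_1.mpr ⟨h1, h2⟩))
  rcases Nat.lt_or_ge n 100 with h'|_
  · exact hm n 0 100 pv_key_0 (by omega) (by omega)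
  rcases Nat.lt_or_ge n 200 with h'|_
  · exact hm n 100 100 pv_key_1 (by omega) (by omega)
  rcases Nat.lt_or_ge n 300 with h'|_
  · exact hm n 200 100 pv_key_2 (by omega) (by omega)
  rcases Nat.lt_or_ge n 400 with h'|_
  · exact hm n 300 100 pv_key_3 (by omega) (by omega)
  rcases Nat.lt_or_ge n 500 with h'|_
  · exact hm n 400 100 pv_key_4 (by omega) (by omega)
  rcases Nat.lt_or_ge n 600 with h'|_
  · exact hm n 500 100 pv_key_5 (by omega) (by omega)
  rcases Nat.lt_or_ge n 700 with h'|_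
  · exact hm n 600 100 pv_key_6 (by omega) (by omega)
  rcases Nat.lt_or_ge n 800 with h'|_
  · exact hm n 700 100 pv_key_7 (by omega) (by omega)
  rcases Nat.lt_or_ge n 900 with h'|_
  · exact hm n 800 100 pv_key_8 (by omega) (by omega)
  exact hm n 900 99 pv_key_9 (by omega) (by omega)

theorem pv_mid (entrada : Int) (h1 : ¬ entrada > 999) (h2 : ¬ entrada < 1) :
    decompor_numero entrada = decompor_numero_alt entrada := by
  have hn : entrada = ((entrada.toNat - 1 : Nat) : Int) + 1 := by omega
  have hlt : entrada.toNat - 1 < 999 := by omega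
  rw [hn]
  exact pv_key _ hlt

-- ===== VERDICT (by name: the statement is the Claim_ definition above) =====
theorem decompor_numero_spec : Claim_equal_decompor_numero := by
  intro entrada _
  unfold Spec_decompor_numero
  by_cases h1 : entrada > 999
  · simp [decompor_numero, decompor_numero_alt, h1]
  · by_cases h2 : entrada < 1
    · simp [decompor_numero, decompor_numero_alt, h1, h2]
    · exact pv_mid entrada h1 h2
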